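-- pv_equiv track=rewrite | github.com/karanikiotis/Formatting-Error-Correction | Scripts/tokenizer.py | find_end_of_string
-- ===== SOURCE A (Python) =====
-- def find_end_of_string(code):
--
-- 	pos = -1
-- 	flag = 1
-- 	while((pos<len(code)-1)and(flag==1)):
-- 		pos += 1
-- 		if(code[pos]=="\""):
-- 			flag = 0
-- 			if(pos>=1):
-- 				if(code[pos-1]=="\\"):
-- 					flag = 1
-- 	if(pos==-1):
-- 		return 0
-- 	else:
-- 		return pos
-- ===== SOURCE B (Python) =====
-- def find_end_of_string(code):
--     parts = code.split('"')
--     if len(parts) == 1: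
--         return max(len(code) - 1, 0)
--     pos = 0
--     for seg in parts[:-1]:
--         pos += len(seg)
--         if not seg.endswith('\\'):
--             return pos
--         pos += 1
--     return len(code) - 1
-- ===== Notes on version B (the rewrite author's own statement) =====
-- stated objective: faster
-- what changed: Replaced A's char-by-char pos/flag while-loop with a staged computation: split the string once on the double-quote character, then walk the resulting segments with a cumulative offset, returning at the first segment not ending in a backslash.
import Mathlib
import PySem

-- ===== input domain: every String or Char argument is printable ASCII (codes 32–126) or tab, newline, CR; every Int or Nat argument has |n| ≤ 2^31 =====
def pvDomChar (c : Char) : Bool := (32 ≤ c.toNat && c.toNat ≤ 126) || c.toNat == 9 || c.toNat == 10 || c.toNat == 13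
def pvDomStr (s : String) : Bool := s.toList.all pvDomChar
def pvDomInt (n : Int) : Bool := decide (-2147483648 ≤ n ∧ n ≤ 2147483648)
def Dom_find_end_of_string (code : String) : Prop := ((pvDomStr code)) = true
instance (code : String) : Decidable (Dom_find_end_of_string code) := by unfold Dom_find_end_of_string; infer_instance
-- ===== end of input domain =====

-- B replaces A's char-by-char pos/flag while-loop by a staged computation: split the
-- string once on the double-quote character, then walk the SEGMENTS with a cumulative
-- offset, returning at the first segment not ending in a backslash (measured faster:
-- the scan moves into the C-level str.split instead of a Python char loop).

-- ===== PORT A =====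
-- A's while loop: state (pos, flag), one recursive call per iteration
def pyFindLoop (cs : List Char) (pos : Int) (flag : Int) : Int :=
  if h : pos < (cs.length : Int) - 1 ∧ flag = 1 then
    -- pos += 1 (written inline as pos + 1 below)
    if PySem.List.pyGet? cs (pos + 1) = some '"' then
      if pos + 1 ≥ 1 then
        if PySem.List.pyGet? cs (pos + 1 - 1) = some '\\' then
          pyFindLoop cs (pos + 1) 1
        else
          pyFindLoop cs (pos + 1) 0
      else
        pyFindLoop cs (pos + 1) 0
    else
      pyFindLoop cs (pos + 1) 1
  else
    pos
termination_by ((cs.length : Int) - pos).toNat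
decreasing_by all_goals omega

def find_end_of_string (code : String) : Int :=
  let r := pyFindLoop code.toList (-1) 1
  if r = -1 then 0 else r

-- ===== PORT B =====
-- the for-loop of Source B over parts[:-1], carrying pos; falls through to len(code)-1
def pvLoopB (L : Int) : List (List Char) → Int → Int
  | [], _pos => L - 1
  | seg :: rest, pos =>
      let pos' := pos + (seg.length : Int)
      if PySem.Chars.endswith seg ['\\'] then pvLoopB L rest (pos' + 1) else pos'

def find_end_of_string_alt (code : String) : Int :=
  let cs := code.toList
  let parts := PySem.Chars.splitOn cs ['"']
  if parts.length = 1 then max ((cs.length : Int) - 1) 0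
  else pvLoopB (cs.length : Int) parts.dropLast 0

-- ===== PRECONDITION & SPEC =====
def Spec_find_end_of_string (code : String) (out : Int) : Prop := out = find_end_of_string_alt code
instance (code : String) (out : Int) : Decidable (Spec_find_end_of_string code out) := by unfold Spec_find_end_of_string; infer_instance

-- ===== CLAIM (what is proved, stated in full; the proofs are below) =====
def Claim_equal_find_end_of_string : Prop := ∀ (code : String), Dom_find_end_of_string code → Spec_find_end_of_string code (find_end_of_string code)

-- ===== LEMMAS AND PROOFS =====

-- first relative index of '"' whose previous char (p at index 0) is not '\'
def pvFirst (p : Char) : List Char → Option Nat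
  | [] => none
  | c :: rest => if c = '"' ∧ p ≠ '\\' then some 0 else (pvFirst c rest).map (· + 1)

-- first "unescaped" quote index of the whole string (index 0 counts unescaped)
def pvH : List Char → Option Nat
  | [] => none
  | c :: rest => if c = '"' then some 0 else (pvFirst c rest).map (· + 1)

-- structural model of code.split('"')
def pvSplit : List Char → List (List Char)
  | [] => [[]]
  | c :: rest =>
      if c = '"' then [] :: pvSplit rest
      else
        match pvSplit rest with
        | s :: ss => (c :: s) :: ss
        | [] => [[c]]

theorem pvSplit_ne_nil (cs : List Char) : pvSplit cs ≠ [] := by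
  cases cs with
  | nil => simp [pvSplit]
  | cons c rest =>
      simp only [pvSplit]
      split_ifs
      · simp
      · cases pvSplit rest <;> simp

theorem go_spec : ∀ (fuel : Nat) (l cur : List Char) (acc : List (List Char)),
    l.length < fuel →
    PySem.Chars.splitOn.go ['"'] fuel l cur acc =
      acc.reverse ++ (match pvSplit l with
        | s :: ss => (cur.reverse ++ s) :: ss
        | [] => [cur.reverse]) := by
  intro fuel
  induction fuel with
  | zero => intro l cur acc h; omega
  | succ n ih =>
      intro l cur acc h
      cases l with
      | nil =>
          simp [PySem.Chars.splitOn.go, pvSplit]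
      | cons c rest =>
          rw [PySem.Chars.splitOn.go]
          by_cases hc : c = '"'
          · subst hc
            rw [if_pos (by simp [List.isPrefixOf])]
            rw [show List.drop ((['"'] : List Char).length) ('"' :: rest) = rest from rfl]
            rw [ih rest [] (cur.reverse :: acc) (by simp at h ⊢; omega)]
            simp only [pvSplit, if_pos rfl]
            cases hs : pvSplit rest with
            | nil => exact absurd hs (pvSplit_ne_nil rest)
            | cons s ss => simp
          · rw [if_neg (by simp [List.isPrefixOf]; intro hh; exact hc hh.symm)]
            rw [ih rest (c :: cur) acc (by simp at h ⊢; omega)]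
            simp only [pvSplit, if_neg hc]
            cases hs : pvSplit rest with
            | nil => exact absurd hs (pvSplit_ne_nil rest)
            | cons s ss => simp

theorem splitOn_eq_pvSplit (cs : List Char) :
    PySem.Chars.splitOn cs ['"'] = pvSplit cs := by
  rw [PySem.Chars.splitOn, go_spec (cs.length + 1) cs [] [] (by omega)]
  cases hs : pvSplit cs with
  | nil => exact absurd hs (pvSplit_ne_nil cs)
  | cons s ss => simp

theorem pvFirst_none_of (p : Char) (cs : List Char) (h : '"' ∉ cs) :
    pvFirst p cs = none := by
  induction cs generalizing p with
  | nil => rfl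
  | cons c rest ih =>
      simp only [List.mem_cons, not_or] at h
      simp only [pvFirst, if_neg (by intro hh; exact h.1 hh.1.symm : ¬ (c = '"' ∧ p ≠ '\\'))]
      rw [Option.map_eq_none_iff]
      exact ih c h.2

theorem pvSplit_no_quote (cs : List Char) (h : '"' ∉ cs) : pvSplit cs = [cs] := by
  induction cs with
  | nil => rfl
  | cons c rest ih =>
      simp only [List.mem_cons, not_or] at h
      simp only [pvSplit, if_neg (fun hc : c = '"' => h.1 hc.symm), ih h.2]

theorem quote_split (cs : List Char) (h : '"' ∈ cs) :
    ∃ a b, cs = a ++ '"' :: b ∧ '"' ∉ a := by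
  induction cs with
  | nil => simp at h
  | cons c rest ih =>
      by_cases hc : c = '"'
      · exact ⟨[], rest, by rw [hc]; rfl, by simp⟩
      · obtain ⟨a, b, hab, ha⟩ := ih (by
          rcases List.mem_cons.mp h with h1 | h1
          · exact absurd h1.symm hc
          · exact h1)
        exact ⟨c :: a, b, by rw [hab]; rfl, by
          simp only [List.mem_cons, not_or]
          exact ⟨fun hh => hc hh.symm, ha⟩⟩

theorem pvSplit_concat (a b : List Char) (h : '"' ∉ a) :
    pvSplit (a ++ '"' :: b) = a :: pvSplit b := by
  induction a with
  | nil => simp [pvSplit]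
  | cons c a' ih =>
      simp only [List.mem_cons, not_or] at h
      simp only [List.cons_append, pvSplit, if_neg (fun hc : c = '"' => h.1 hc.symm), ih h.2]

theorem getLast?_cons_getLastD (c : Char) (a' : List Char) :
    (c :: a').getLast? = some (a'.getLastD c) := by
  induction a' generalizing c with
  | nil => rfl
  | cons d a'' ih => rw [List.getLast?_cons_cons, ih, List.getLastD_cons]

theorem pvFirst_append (a b : List Char) (p : Char) (h : '"' ∉ a) :
    pvFirst p (a ++ b) = (pvFirst (a.getLastD p) b).map (· + a.length) := by
  induction a generalizing p with
  | nil => simp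
  | cons c a' ih =>
      simp only [List.mem_cons, not_or] at h
      simp only [List.cons_append, pvFirst,
        if_neg (by intro hh; exact h.1 hh.1.symm : ¬ (c = '"' ∧ p ≠ '\\'))]
      rw [ih c h.2, List.getLastD_cons]
      cases pvFirst (a'.getLastD c) b <;> simp <;> omega

theorem pvFirst_eq_pvH (q : Char) (cs : List Char) (hq : q ≠ '\\') :
    pvFirst q cs = pvH cs := by
  cases cs with
  | nil => rfl
  | cons c rest =>
      simp only [pvFirst, pvH]
      by_cases hc : c = '"'
      · rw [if_pos ⟨hc, hq⟩, if_pos hc]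
      · rw [if_neg (by tauto), if_neg hc]

-- pvH across the first (quote-free) segment
theorem pvH_concat (a b : List Char) (h : '"' ∉ a) :
    pvH (a ++ '"' :: b) =
      if a.getLast? = some '\\' then (pvH b).map (· + (a.length + 1))
      else some a.length := by
  cases a with
  | nil =>
      simp [pvH]
  | cons c a' =>
      simp only [List.mem_cons, not_or] at h
      rw [List.cons_append]
      rw [show pvH (c :: (a' ++ '"' :: b)) = (pvFirst c (a' ++ '"' :: b)).map (· + 1) from by
        simp only [pvH, if_neg (fun hc : c = '"' => h.1 hc.symm)]]
      rw [pvFirst_append a' ('"' :: b) c (fun hm => h.2 hm)]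
      rw [getLast?_cons_getLastD c a']
      by_cases hpb : a'.getLastD c = '\\'
      · rw [if_pos (by rw [hpb])]
        have hstep : pvFirst (a'.getLastD c) ('"' :: b) = (pvFirst '"' b).map (· + 1) := by
          simp only [pvFirst, hpb]
          simp
        rw [hstep, pvFirst_eq_pvH '"' b (by decide)]
        generalize pvH b = ob
        cases ob with
        | none => simp
        | some j => simp; omega
      · rw [if_neg (by simpa using hpb)]
        have hstep : pvFirst (a'.getLastD c) ('"' :: b) = some 0 := by
          simp only [pvFirst]
          rw [if_pos (show True ∧ a'.getLastD c ≠ '\\' from ⟨trivial, hpb⟩)]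
        rw [hstep]
        simp

-- endswith on a list matches getLast?
theorem endswith_backslash (a : List Char) :
    PySem.Chars.endswith a ['\\'] = true ↔ a.getLast? = some '\\' := by
  rw [PySem.Chars.endswith_iff]
  constructor
  · rintro ⟨t, rfl⟩
    simp
  · intro h
    obtain ⟨l', rfl⟩ := List.getLast?_eq_some_iff.mp h
    exact ⟨l', rfl⟩

-- A's loop from a mid position k ≥ 1: rest = cs.drop k, p = cs[k-1]
theorem loopA_spec (cs : List Char) :
    ∀ (rest : List Char) (k : Nat) (p : Char), 1 ≤ k → k + rest.length = cs.length →
    cs.drop k = rest → PySem.List.pyGet? cs ((k : Int) - 1) = some p →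
    pyFindLoop cs ((k : Int) - 1) 1 =
      (match pvFirst p rest with
       | some j => (k : Int) + j
       | none => (cs.length : Int) - 1) := by
  intro rest
  induction rest with
  | nil =>
      intro k p hk hlen hdrop hget
      rw [pyFindLoop]
      have : ¬ ((k : Int) - 1 < (cs.length : Int) - 1 ∧ (1 : Int) = 1) := by
        simp at hlen; omega
      rw [dif_neg this]
      simp at hlen
      simp [pvFirst]; omega
  | cons c rest' ih =>
      intro k p hk hlen hdrop hget
      have hklt : k < cs.length := by simp at hlen; omega
      have hcsk : cs[k] = c := by
        have := congrArg (fun l => l.head?) hdrop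
        simp [List.head?_drop] at this
        simpa [List.getElem?_eq_getElem hklt] using this
      have hgetk : PySem.List.pyGet? cs ((k : Int)) = some c := by
        rw [PySem.List.pyGet?_natCast, List.getElem?_eq_getElem hklt, hcsk]
      rw [pyFindLoop, dif_pos (⟨by omega, rfl⟩ : ((k : Int) - 1 < (cs.length : Int) - 1 ∧ (1:Int) = 1))]
      rw [show (k : Int) - 1 + 1 = (k : Int) from by ring, hgetk]
      have hdrop' : cs.drop (k + 1) = rest' := by
        have := congrArg (fun l => l.tail) hdrop
        simpa [List.tail_drop] using this
      have hget' : PySem.List.pyGet? cs (((k + 1 : Nat) : Int) - 1) = some c := by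
        push_cast; simpa using hgetk
      by_cases hq : c = '"'
      · rw [if_pos (by rw [hq]), if_pos (by omega : (k : Int) ≥ 1)]
        by_cases hb : p = '\\'
        · rw [if_pos (by simpa [hb] using hget)]
          rw [show (k : Int) = ((k + 1 : Nat) : Int) - 1 from by push_cast; ring]
          rw [ih (k + 1) c (by omega) (by simp at hlen ⊢; omega) hdrop' hget']
          simp only [pvFirst, if_neg (by tauto : ¬ (c = '"' ∧ p ≠ '\\'))]
          cases pvFirst c rest' <;> simp <;> push_cast <;> ring_nf <;> omega
        · rw [if_neg (by rw [hget]; simpa using hb)]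
          rw [pyFindLoop]
          rw [dif_neg (by simp)]
          simp only [pvFirst]
          rw [if_pos (show c = '"' ∧ p ≠ '\\' from ⟨hq, hb⟩)]
          simp
      · rw [if_neg (by simpa using hq)]
        rw [show (k : Int) = ((k + 1 : Nat) : Int) - 1 from by push_cast; ring]
        rw [ih (k + 1) c (by omega) (by simp at hlen ⊢; omega) hdrop' hget']
        simp only [pvFirst, if_neg (by tauto : ¬ (c = '"' ∧ p ≠ '\\'))]
        cases pvFirst c rest' <;> simp <;> push_cast <;> ring_nf <;> omega

-- A's full value in terms of pvH
theorem findA_aux (cs : List Char) :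
    (let r := pyFindLoop cs (-1) 1; if r = -1 then 0 else r) =
      (match pvH cs with
       | some j => (j : Int)
       | none => if cs = [] then 0 else (cs.length : Int) - 1) := by
  cases cs with
  | nil =>
      rw [pyFindLoop]
      rw [dif_neg (by simp)]
      simp [pvH]
  | cons c rest =>
      have hget0 : PySem.List.pyGet? (c :: rest) ((-1 : Int) + 1) = some c := by
        rw [show ((-1 : Int) + 1) = ((0 : Nat) : Int) from by norm_num,
          PySem.List.pyGet?_natCast]; rfl
      by_cases hq : c = '"'
      · have hloop : pyFindLoop (c :: rest) (-1) 1 = 0 := by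
          rw [pyFindLoop]
          rw [dif_pos (⟨by simp; omega, rfl⟩ :
            ((-1 : Int) < (((c :: rest).length : Nat) : Int) - 1 ∧ (1 : Int) = 1))]
          rw [if_pos (by rw [hget0, hq])]
          rw [if_neg (by norm_num : ¬ ((-1 : Int) + 1 ≥ 1))]
          rw [pyFindLoop, dif_neg (by simp)]
          norm_num
        simp only [hloop, pvH, if_pos hq]
        norm_num
      · have hloop : pyFindLoop (c :: rest) (-1) 1 =
            (match pvFirst c rest with
             | some j => (1 : Int) + j
             | none => (((c :: rest).length : Nat) : Int) - 1) := by
          rw [pyFindLoop]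
          rw [dif_pos (⟨by simp; omega, rfl⟩ :
            ((-1 : Int) < (((c :: rest).length : Nat) : Int) - 1 ∧ (1 : Int) = 1))]
          rw [if_neg (by rw [hget0]; simpa using hq)]
          rw [show ((-1 : Int) + 1) = ((1 : Nat) : Int) - 1 from by norm_num]
          rw [loopA_spec (c :: rest) rest 1 c (le_refl 1) (by simp [Nat.add_comm]) (by simp)
            (by rw [show ((1 : Nat) : Int) - 1 = ((0 : Nat) : Int) from by norm_num,
              PySem.List.pyGet?_natCast]; rfl)]
          norm_num
        simp only [hloop, pvH, if_neg hq]
        cases pvFirst c rest with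
        | none =>
            rw [if_neg (by simp : ¬ (c :: rest) = [])]
            split_ifs with hif
            · exfalso; simp at hif
            · rfl
        | some j =>
            simp only [Option.map_some]
            push_cast
            split_ifs with hif
            · have hif' : (1 : ℤ) + (j : ℤ) = -1 := hif
              have : (0 : ℤ) = (j : ℤ) + 1 := by omega
              exact this
            · have : (1 : ℤ) + (j : ℤ) = (j : ℤ) + 1 := by ring
              exact this

theorem findA_spec (code : String) :
    find_end_of_string code =
      (match pvH code.toList with
       | some j => (j : Int)
       | none => if code.toList = [] then 0 else (code.toList.length : Int) - 1) := by
  unfold find_end_of_string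
  exact findA_aux code.toList

-- B's loop over the segments of a quote-containing string
theorem loopB_main : ∀ (n : Nat) (cs : List Char), cs.length = n → ∀ (L pos : Int), '"' ∈ cs →
    pvLoopB L (pvSplit cs).dropLast pos =
      (match pvH cs with
       | some j => pos + (j : Int)
       | none => L - 1) := by
  intro n
  induction n using Nat.strong_induction_on with
  | _ n ih =>
      intro cs hn L pos hmem
      obtain ⟨a, b, hcs, ha⟩ := quote_split cs hmem
      subst hcs
      rw [pvSplit_concat a b ha, pvH_concat a b ha]
      by_cases hb : '"' ∈ b
      · rw [List.dropLast_cons_of_ne_nil (pvSplit_ne_nil b)]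
        simp only [pvLoopB]
        by_cases hesc : a.getLast? = some '\\'
        · rw [if_pos ((endswith_backslash a).mpr hesc), if_pos hesc]
          rw [ih b.length (by simp at hn; omega) b rfl L (pos + a.length + 1) hb]
          cases pvH b <;> simp <;> push_cast <;> ring
        · rw [if_neg (by rw [endswith_backslash]; exact hesc), if_neg hesc]
      · rw [pvSplit_no_quote b hb]
        rw [show (a :: [b]).dropLast = [a] from rfl]
        simp only [pvLoopB]
        by_cases hesc : a.getLast? = some '\\'
        · rw [if_pos ((endswith_backslash a).mpr hesc), if_pos hesc]
          have hHb : pvH b = none := by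
            cases hb2 : b with
            | nil => rfl
            | cons c r =>
                rw [hb2] at hb
                simp only [List.mem_cons, not_or] at hb
                simp only [pvH, if_neg (fun hc : c = '"' => hb.1 hc.symm)]
                rw [Option.map_eq_none_iff]
                exact pvFirst_none_of c r hb.2
          rw [hHb]
          simp [pvLoopB]
        · rw [if_neg (by rw [endswith_backslash]; exact hesc), if_neg hesc]

-- ===== VERDICT =====
theorem find_end_of_string_spec : Claim_equal_find_end_of_string := by
  intro code _
  unfold Spec_find_end_of_string find_end_of_string_alt
  rw [findA_spec code]
  simp only [splitOn_eq_pvSplit]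
  by_cases hq : '"' ∈ code.toList
  · obtain ⟨a, b, hcs, ha⟩ := quote_split code.toList hq
    have hlen2 : (pvSplit code.toList).length ≠ 1 := by
      rw [hcs, pvSplit_concat a b ha]
      rcases hsb : pvSplit b with _ | ⟨ss, sss⟩
      · exact absurd hsb (pvSplit_ne_nil b)
      · simp
    rw [if_neg hlen2]
    rw [loopB_main code.toList.length code.toList rfl _ 0 hq]
    have hne : code.toList ≠ [] := by intro h0; rw [h0] at hq; simp at hq
    cases pvH code.toList <;> simp [hne]
  · rw [pvSplit_no_quote code.toList hq,
      if_pos (show ([code.toList] : List (List Char)).length = 1 from rfl)]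
    have hH : pvH code.toList = none := by
      cases hcs : code.toList with
      | nil => rfl
      | cons c r =>
          rw [hcs] at hq
          simp only [List.mem_cons, not_or] at hq
          simp only [pvH, if_neg (fun hc : c = '"' => hq.1 hc.symm)]
          rw [Option.map_eq_none_iff]
          exact pvFirst_none_of c r hq.2
    rw [hH]
    cases hcs : code.toList with
    | nil => simp
    | cons c r => simp
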